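-- pv_equiv track=rewrite | github.com/LaRenaiocco/job-practice | killer.py | killer
-- ===== SOURCE A (Python) =====
-- def killer(suspect_info, dead):
--     """
--     >>> killer({'James': ['Jacob', 'Bill', 'Lucas'], 'Johnny': ['David', 'Kyle', 'Lucas'],'Peter': ['Lucy', 'Kyle']}, ['Lucas', 'Bill'])
--     'James'
--     """
--     killed_tally = len(dead)
--
--     for suspect in suspect_info:
--         contacts_tally = 0
--         for person in dead:
--             if person in suspect_info[suspect]:
--                 contacts_tally += 1
--         if contacts_tally == killed_tally:
--             return suspect
-- ===== SOURCE B (Python) =====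
-- def killer(suspect_info, dead):
--     # Inverted index: contacted person -> set of suspects whose contacts include them.
--     index = {}
--     for suspect in suspect_info:
--         for person in suspect_info[suspect]:
--             index.setdefault(person, set()).add(suspect)
--     # Suspects whose contacts cover every dead person (empty dead -> all suspects).
--     candidates = set(suspect_info)
--     for person in dead:
--         candidates &= index.get(person, set())
--     # First qualifying suspect in the original insertion order.
--     for suspect in suspect_info:
--         if suspect in candidates:
--             return suspect
--     return None
-- ===== Notes on version B (the rewrite author's own statement) =====
-- stated objective: faster
-- what changed: Replaces A's per-suspect counting scan over dead (with a dict lookup and list scan per (suspect, dead) pair) by an inverted index (person -> set of suspects contacting them) built in one pass, intersected over the dead list, then a single ordered scan returns the first suspect in the intersection.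
import Mathlib
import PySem

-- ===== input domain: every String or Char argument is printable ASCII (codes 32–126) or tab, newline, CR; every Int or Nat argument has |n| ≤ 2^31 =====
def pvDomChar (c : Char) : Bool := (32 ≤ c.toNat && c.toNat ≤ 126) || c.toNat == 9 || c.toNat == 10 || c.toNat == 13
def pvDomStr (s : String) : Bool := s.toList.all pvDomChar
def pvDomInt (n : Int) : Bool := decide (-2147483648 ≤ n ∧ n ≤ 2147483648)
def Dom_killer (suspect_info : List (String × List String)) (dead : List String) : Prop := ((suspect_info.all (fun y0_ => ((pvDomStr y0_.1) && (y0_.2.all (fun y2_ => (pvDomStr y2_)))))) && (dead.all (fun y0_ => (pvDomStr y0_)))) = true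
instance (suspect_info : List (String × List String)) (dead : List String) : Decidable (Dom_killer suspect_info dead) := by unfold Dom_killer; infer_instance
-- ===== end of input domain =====

-- B replaces A's per-suspect counting scan over `dead` with an inverted index (person →
-- set of suspects) built once and intersected over `dead`; a timing run measured B faster.

-- ===== PORT A =====
-- dict access suspect_info[suspect] (assoc-list dict, first-match lookup; the key always
-- comes from iterating the dict, so the KeyError default is never used)
def killerContacts (suspect_info : List (String × List String)) (s : String) : List String :=
  ((PySem.Dict.mk suspect_info).get? s).getD []

-- A's `for suspect in suspect_info` loop with its inner counting loop over `dead`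
def killerFind (suspect_info : List (String × List String)) (dead : List String)
    (killedTally : Int) : List (String × List String) → Option String
  | [] => none
  | (s, _) :: rest =>
    let contacts := killerContacts suspect_info s
    let contactsTally :=
      dead.foldl (fun acc person => if contacts.contains person then acc + 1 else acc) (0 : Int)
    if contactsTally = killedTally then some s else killerFind suspect_info dead killedTally rest

def killer (suspect_info : List (String × List String)) (dead : List String) : Option String :=
  killerFind suspect_info dead (PySem.List.len dead) suspect_info

-- ===== PORT B =====
-- index.setdefault(person, set()).add(suspect), looped over each suspect's contacts
def killerAltIndex (suspect_info : List (String × List String)) :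
    PySem.Dict String (PySem.Set String) :=
  suspect_info.foldl
    (fun idx pr =>
      (killerContacts suspect_info pr.1).foldl
        (fun idx person => idx.modify person PySem.Set.empty (fun st => PySem.Set.add st pr.1))
        idx)
    PySem.Dict.empty

-- final loop: first suspect (in insertion order) that is in candidates
def killerAltFind (candidates : PySem.Set String) : List (String × List String) → Option String
  | [] => none
  | (s, _) :: rest => if PySem.Set.contains candidates s then some s else killerAltFind candidates rest

def killer_alt (suspect_info : List (String × List String)) (dead : List String) : Option String :=
  let index := killerAltIndex suspect_info
  let candidates :=
    dead.foldl (fun c person => PySem.Set.inter c (index.getD person PySem.Set.empty))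
      (PySem.Set.ofList (suspect_info.map (·.1)))
  killerAltFind candidates suspect_info

-- ===== PRECONDITION & SPEC =====
def Spec_killer (suspect_info : List (String × List String)) (dead : List String) (out : Option String) : Prop := out = killer_alt suspect_info dead
instance (suspect_info : List (String × List String)) (dead : List String) (out : Option String) : Decidable (Spec_killer suspect_info dead out) := by unfold Spec_killer; infer_instance

-- ===== CLAIM (what is proved, stated in full; the proofs are below) =====
def Claim_equal_killer : Prop := ∀ (suspect_info : List (String × List String)) (dead : List String), Dom_killer suspect_info dead → Spec_killer suspect_info dead (killer suspect_info dead)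

-- ===== LEMMAS AND PROOFS =====

-- A's inner loop counts every dead person; the count reaches len(dead) iff all are contacts
theorem killer_count_eq_len_iff (dead contacts : List String) :
    (dead.foldl (fun acc person => if contacts.contains person then acc + 1 else acc) (0 : Int)
      = PySem.List.len dead) ↔ ∀ p ∈ dead, p ∈ contacts := by
  rw [PySem.List.foldl_count_if, PySem.List.len_eq]
  have hcast : ((0 : Int) + (List.countP (fun person => contacts.contains person) dead : Int)
      = (dead.length : Int))
      ↔ List.countP (fun person => contacts.contains person) dead = dead.length := by omega
  rw [hcast, List.countP_eq_length]
  simp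

-- membership in the index after the inner loop over one suspect's contacts
theorem killer_mem_inner_fold (contacts : List String) (s : String)
    (idx : PySem.Dict String (PySem.Set String)) (p q : String) :
    q ∈ (contacts.foldl
          (fun idx person => idx.modify person PySem.Set.empty (fun st => PySem.Set.add st s))
          idx).getD p PySem.Set.empty
      ↔ q ∈ idx.getD p PySem.Set.empty ∨ (p ∈ contacts ∧ q = s) := by
  induction contacts generalizing idx with
  | nil => simp
  | cons c cs ih =>
    simp only [List.foldl_cons, ih, PySem.Dict.getD_modify]
    by_cases hpc : p = c
    · subst hpc
      simp [PySem.Set.mem_add]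
      tauto
    · simp [hpc]

-- membership in the fully built inverted index
theorem killer_mem_index_fold (suspect_info cur : List (String × List String))
    (idx : PySem.Dict String (PySem.Set String)) (p q : String) :
    q ∈ (cur.foldl
          (fun idx pr =>
            (killerContacts suspect_info pr.1).foldl
              (fun idx person => idx.modify person PySem.Set.empty (fun st => PySem.Set.add st pr.1))
              idx)
          idx).getD p PySem.Set.empty
      ↔ q ∈ idx.getD p PySem.Set.empty
          ∨ ∃ pr ∈ cur, pr.1 = q ∧ p ∈ killerContacts suspect_info q := by
  induction cur generalizing idx with
  | nil => simp
  | cons pr rest ih =>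
    simp only [List.foldl_cons, ih, killer_mem_inner_fold]
    constructor
    · rintro (⟨h | ⟨hp, rfl⟩⟩ | ⟨pr', h1, h2, h3⟩)
      · exact Or.inl h
      · exact Or.inr ⟨pr, List.mem_cons_self, rfl, hp⟩
      · exact Or.inr ⟨pr', List.mem_cons_of_mem _ h1, h2, h3⟩
    · rintro (h | ⟨pr', h1, rfl, h3⟩)
      · exact Or.inl (Or.inl h)
      · rcases List.mem_cons.mp h1 with rfl | h1
        · exact Or.inl (Or.inr ⟨h3, rfl⟩)
        · exact Or.inr ⟨pr', h1, rfl, h3⟩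

theorem killer_mem_index (suspect_info : List (String × List String)) (p q : String) :
    q ∈ (killerAltIndex suspect_info).getD p PySem.Set.empty
      ↔ q ∈ suspect_info.map (·.1) ∧ p ∈ killerContacts suspect_info q := by
  unfold killerAltIndex
  rw [killer_mem_index_fold]
  simp only [PySem.Dict.getD_empty]
  constructor
  · rintro (h | ⟨pr, h1, rfl, h3⟩)
    · simp at h
    · exact ⟨List.mem_map_of_mem h1, h3⟩
  · rintro ⟨h1, h2⟩
    rcases List.mem_map.mp h1 with ⟨pr, hpr, rfl⟩
    exact Or.inr ⟨pr, hpr, rfl, h2⟩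

-- membership in the intersection accumulated over dead
theorem killer_mem_cands_fold (dead : List String)
    (idx : PySem.Dict String (PySem.Set String)) (c0 : PySem.Set String) (q : String) :
    q ∈ dead.foldl (fun c person => PySem.Set.inter c (idx.getD person PySem.Set.empty)) c0
      ↔ q ∈ c0 ∧ ∀ p ∈ dead, q ∈ idx.getD p PySem.Set.empty := by
  induction dead generalizing c0 with
  | nil => simp
  | cons d ds ih =>
    simp only [List.foldl_cons, ih, PySem.Set.mem_inter]
    constructor
    · rintro ⟨⟨h1, h2⟩, h3⟩
      exact ⟨h1, fun p hp => by rcases List.mem_cons.mp hp with rfl | hp; exacts [h2, h3 p hp]⟩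
    · rintro ⟨h1, h2⟩
      exact ⟨⟨h1, h2 d List.mem_cons_self⟩, fun p hp => h2 p (List.mem_cons_of_mem _ hp)⟩

-- the two find loops agree step by step
theorem killer_loops_eq (suspect_info : List (String × List String)) (dead : List String)
    (cur : List (String × List String)) (hcur : ∀ pr ∈ cur, pr.1 ∈ suspect_info.map (·.1)) :
    killerFind suspect_info dead (PySem.List.len dead) cur
      = killerAltFind
          (dead.foldl
            (fun c person => PySem.Set.inter c ((killerAltIndex suspect_info).getD person PySem.Set.empty))
            (PySem.Set.ofList (suspect_info.map (·.1))))
          cur := by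
  induction cur with
  | nil => rfl
  | cons pr rest ih =>
    obtain ⟨s, v⟩ := pr
    have hs : s ∈ suspect_info.map (·.1) := hcur (s, v) List.mem_cons_self
    have hcond :
        (dead.foldl (fun acc person => if (killerContacts suspect_info s).contains person then acc + 1 else acc) (0 : Int)
            = PySem.List.len dead)
          ↔ s ∈ dead.foldl
              (fun c person => PySem.Set.inter c ((killerAltIndex suspect_info).getD person PySem.Set.empty))
              (PySem.Set.ofList (suspect_info.map (·.1))) := by
      rw [killer_count_eq_len_iff, killer_mem_cands_fold]
      simp only [killer_mem_index, PySem.Set.mem_ofList]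
      constructor
      · intro h
        exact ⟨hs, fun p hp => ⟨hs, h p hp⟩⟩
      · rintro ⟨_, h⟩ p hp
        exact (h p hp).2
    show (if _ then _ else _) = (if _ then _ else _)
    rw [ih (fun pr hpr => hcur pr (List.mem_cons_of_mem _ hpr))]
    by_cases h : dead.foldl (fun acc person => if (killerContacts suspect_info s).contains person then acc + 1 else acc) (0 : Int) = PySem.List.len dead
    · rw [if_pos h, if_pos (by simpa [PySem.Set.contains_iff] using hcond.mp h)]
    · rw [if_neg h, if_neg (by simpa [PySem.Set.contains_iff] using fun hm => h (hcond.mpr hm))]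

-- ===== VERDICT (by name: the statement is the Claim_ definition above) =====
theorem killer_spec : Claim_equal_killer := by
  intro suspect_info dead _
  unfold Spec_killer killer killer_alt
  exact killer_loops_eq suspect_info dead suspect_info
    (fun pr hpr => List.mem_map.mpr ⟨pr, hpr, rfl⟩)
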